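-- pv_equiv track=rewrite | github.com/elaijuh/cp | leetcode/minimum-k-to-reduce-array-within-limit/s1.py | minimumK
-- ===== SOURCE A (Python) =====
-- from typing import List
--
-- def minimumK(nums: List[int]) -> int:
--     n = len(nums)
--     s = sum(nums)
--     # s/k <= nonPositive(nums,k) <= (s+nk)/k
--     l = 1
--     h = 1
--     while True:
--         if s <= l**3:
--             break
--         l += 1
--     while True:
--         if s + n * h <= h**3:
--             break
--         h += 1
--     for k in range(l, h + 1):
--         s = 0
--         for num in nums:
--             s += (num + k - 1) // k
--         if s <= k * k:
--             break
--     return k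
-- ===== SOURCE B (Python) =====
-- def minimumK(nums):
--     def ok(k):
--         return sum(-(-num // k) for num in nums) <= k * k
--     s = sum(nums)
--     lo, hi = 1, max(s, 1)      # binary search the least k >= 1 with k**3 >= s
--     while lo < hi:
--         mid = (lo + hi) // 2
--         if mid * mid * mid < s:
--             lo = mid + 1
--         else:
--             hi = mid
--     k = lo                      # no k below lo can work, scan up for the first that does
--     while not ok(k):
--         k += 1
--     return k
-- ===== Notes on version B (the rewrite author's own statement) =====
-- stated objective: alternative
-- what changed: Replaces A's three incremental loops (linear search for the lower bound l with s<=l^3, linear search for an upper bound h, then a scan of [l,h] that falls back to h) by a binary search for the cube-root lower bound followed by an open-ended scan for the first k with sum(ceil(num/k)) <= k^2, with ceiling division written as -(-num//k); no upper bound h is computed, equivalence rests on proving A's h always satisfies the predicate.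
import Mathlib
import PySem

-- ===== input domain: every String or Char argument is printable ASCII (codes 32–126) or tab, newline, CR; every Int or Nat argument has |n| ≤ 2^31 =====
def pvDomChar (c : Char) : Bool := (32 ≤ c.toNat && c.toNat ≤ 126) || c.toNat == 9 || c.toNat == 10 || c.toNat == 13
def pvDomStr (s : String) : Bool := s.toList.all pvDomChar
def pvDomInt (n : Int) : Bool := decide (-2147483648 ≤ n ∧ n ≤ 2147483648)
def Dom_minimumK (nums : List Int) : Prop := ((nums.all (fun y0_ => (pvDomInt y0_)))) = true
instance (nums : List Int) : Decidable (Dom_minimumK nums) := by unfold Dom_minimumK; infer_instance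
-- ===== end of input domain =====

-- B replaces A's three incremental bound-hunting loops by a binary search for the
-- cube-root lower bound and an open-ended scan for the first k with
-- sum(ceil(num/k)) ≤ k² (no upper bound h is computed); objective: alternative.

-- ===== PORT A =====
-- inner loop: s = 0; for num in nums: s += (num + k - 1) // k
def aCeilSum (nums : List Int) (k : Int) : Int :=
  nums.foldl (fun s num => s + PySem.Int.floordiv (num + k - 1) k) 0

-- generic decrease of the (bound - k).toNat measures
theorem toNat_dec (a k : Int) (h : k < a) : (a - (k + 1)).toNat < (a - k).toNat :=
  (Int.toNat_lt_toNat (Int.sub_pos.mpr h)).mpr (sub_lt_sub_left (lt_add_one k) a)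

theorem cube_ge_self (l : Int) (h1 : 1 ≤ l) : l ≤ l ^ 3 := by
  have h0 : (0 : Int) ≤ l := le_trans zero_le_one h1
  have h2 : l ≤ l * l := le_mul_of_one_le_left h0 h1
  have h3 : l * l ≤ l * l * l := le_mul_of_one_le_right (mul_nonneg h0 h0) h1
  have h4 : l * l * l = l ^ 3 := by ring
  linarith

-- measure lemma for lLoop's decreasing_by
theorem lLoop_dec (s l : Int) (hguard : ¬ s ≤ l ^ 3) :
    (|s| + 1 - (l + 1)).toNat < (|s| + 1 - l).toNat := by
  refine toNat_dec _ _ ?_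
  by_contra hcon
  apply hguard
  have hge : |s| + 1 ≤ l := not_lt.mp hcon
  have h1 : (1 : Int) ≤ l := le_trans (by linarith [abs_nonneg s]) hge
  linarith [le_abs_self s, cube_ge_self l h1]

-- while True: if s <= l**3: break; l += 1
def lLoop (s l : Int) : Int :=
  if s ≤ l ^ 3 then l else lLoop s (l + 1)
termination_by (|s| + 1 - l).toNat
decreasing_by exact lLoop_dec s l (by assumption)

-- measure lemma for hLoop's decreasing_by
theorem hLoop_dec (s n h : Int) (hguard : ¬ s + n * h ≤ h ^ 3) :
    (|s| + |n| + 2 - (h + 1)).toNat < (|s| + |n| + 2 - h).toNat := by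
  refine toNat_dec _ _ ?_
  by_contra hcon
  apply hguard
  have hge : |s| + |n| + 2 ≤ h := not_lt.mp hcon
  have hs0 := abs_nonneg s
  have hn0 := abs_nonneg n
  have h1 : (1 : Int) ≤ h := by linarith
  have h0 : (0 : Int) ≤ h := by linarith
  have hna : n * h ≤ |n| * h := mul_le_mul_of_nonneg_right (le_abs_self n) h0
  have hnb : |n| * h ≤ (h - 2) * h := mul_le_mul_of_nonneg_right (by linarith) h0
  have hexp : (h - 2) * h = h * h - 2 * h := by ring
  have hsq : h * h ≤ h * h * h := le_mul_of_one_le_right (mul_nonneg h0 h0) h1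
  have hcube : h * h * h = h ^ 3 := by ring
  linarith [le_abs_self s]

-- while True: if s + n * h <= h**3: break; h += 1
def hLoop (s n h : Int) : Int :=
  if s + n * h ≤ h ^ 3 then h else hLoop s n (h + 1)
termination_by (|s| + |n| + 2 - h).toNat
decreasing_by exact hLoop_dec s n h (by assumption)

-- measure lemma for aScan's decreasing_by
theorem aScan_dec (k h : Int) (hlt : k < h) : (h - (k + 1)).toNat < (h - k).toNat :=
  toNat_dec h k hlt

-- for k in range(l, h + 1): …; if s <= k*k: break   — k keeps its last value h if no break
def aScan (nums : List Int) (k h : Int) : Int :=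
  if aCeilSum nums k ≤ k * k then k
  else if k < h then aScan nums (k + 1) h else h
termination_by (h - k).toNat
decreasing_by exact aScan_dec k h (by assumption)

def minimumK (nums : List Int) : Int :=
  aScan nums (lLoop nums.sum 1) (hLoop nums.sum (nums.length : Int) 1)

-- ===== PORT B =====
-- sum(-(-num // k) for num in nums)   (body of ok(k))
def bCeilSum (nums : List Int) (k : Int) : Int :=
  nums.foldl (fun s num => s + -(PySem.Int.floordiv (-num) k)) 0

-- ceiling-division bracket, used by bLoop's termination proof and the equivalence proofs
theorem bceil_bracket (num k : Int) (hk : 0 < k) :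
    (-(PySem.Int.floordiv (-num) k) - 1) * k < num ∧ num ≤ -(PySem.Int.floordiv (-num) k) * k :=
  (PySem.Int.neg_floordiv_neg_eq_iff_of_pos hk).mp rfl

theorem bCeilSum_eq_sum (nums : List Int) (k : Int) :
    bCeilSum nums k = (nums.map (fun num => -(PySem.Int.floordiv (-num) k))).sum := by
  have := PySem.List.foldl_add (l := nums) (a := (0:Int))
    (g := fun num => -(PySem.Int.floordiv (-num) k))
  simpa [bCeilSum] using this

theorem bCeilSum_mul_bounds (nums : List Int) (k : Int) (hk : 0 < k) :
    nums.sum ≤ k * bCeilSum nums k ∧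
      k * bCeilSum nums k ≤ nums.sum + (nums.length : Int) * (k - 1) := by
  rw [bCeilSum_eq_sum]
  induction nums with
  | nil => simp
  | cons x xs ih =>
    obtain ⟨ih1, ih2⟩ := ih
    obtain ⟨hb1, hb2⟩ := bceil_bracket x k hk
    simp only [List.map_cons, List.sum_cons, List.length_cons]
    push_cast
    set c := -(PySem.Int.floordiv (-x) k) with hc
    set S := (xs.map (fun num => -(PySem.Int.floordiv (-num) k))).sum with hS
    have hdist : k * (c + S) = k * c + k * S := by ring
    have hcomm : c * k = k * c := mul_comm c k
    have hexp1 : (c - 1) * k = c * k - k := by ring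
    have hexp2 : ((xs.length : Int) + 1) * (k - 1) = (xs.length : Int) * (k - 1) + (k - 1) := by ring
    constructor
    · linarith
    · linarith

-- bound used by bLoop's decreasing_by
theorem bLoop_guard_bound (nums : List Int) (k : Int)
    (h : ¬ bCeilSum nums k ≤ k * k) : k < (nums.length : Int) + |nums.sum| + 2 := by
  by_contra hcon
  apply h
  have hge : (nums.length : Int) + |nums.sum| + 2 ≤ k := not_lt.mp hcon
  have hn : (0 : Int) ≤ (nums.length : Int) := Int.natCast_nonneg _
  have hs0 := abs_nonneg nums.sum
  have hk2 : (2 : Int) ≤ k := by linarith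
  have hk : (0 : Int) < k := by linarith
  have hb := (bCeilSum_mul_bounds nums k hk).2
  have hL1 : (nums.length : Int) * (k - 1) ≤ (k - 2) * (k - 1) :=
    mul_le_mul_of_nonneg_right (by linarith) (by linarith)
  have hexp : (k - 2) * (k - 1) = k * k - 3 * k + 2 := by ring
  have hSk : bCeilSum nums k ≤ k := by
    refine le_of_mul_le_mul_left ?_ hk
    linarith [le_abs_self nums.sum]
  have hkk : k ≤ k * k := le_mul_of_one_le_left (le_of_lt hk) (by linarith)
  linarith

-- measure lemma for bLoop's decreasing_by
theorem bLoop_dec (nums : List Int) (k : Int) (hguard : ¬ bCeilSum nums k ≤ k * k) :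
    ((nums.length : Int) + |nums.sum| + 2 - (k + 1)).toNat <
      ((nums.length : Int) + |nums.sum| + 2 - k).toNat :=
  toNat_dec _ _ (bLoop_guard_bound nums k hguard)

-- while not ok(k): k += 1
def bLoop (nums : List Int) (k : Int) : Int :=
  if bCeilSum nums k ≤ k * k then k else bLoop nums (k + 1)
termination_by ((nums.length : Int) + |nums.sum| + 2 - k).toNat
decreasing_by exact bLoop_dec nums k (by assumption)

-- midpoint bracket and measure lemmas for bSearch's decreasing_by
theorem bSearch_dec (lo hi : Int) (hlt : lo < hi) :
    (PySem.Int.floordiv (lo + hi) 2 < hi) ∧ (lo ≤ PySem.Int.floordiv (lo + hi) 2) := by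
  constructor
  · rw [PySem.Int.floordiv_lt_iff_lt_mul (by omega)]; omega
  · exact (PySem.Int.floordiv_two_mid_bounds (by omega)).1

theorem toNat_sub_lt_left (lo hi m : Int) (h1 : lo ≤ m) (h2 : m < hi) :
    (hi - (m + 1)).toNat < (hi - lo).toNat :=
  (Int.toNat_lt_toNat (Int.sub_pos.mpr (lt_of_le_of_lt h1 h2))).mpr
    (sub_lt_sub_left (Int.lt_add_one_iff.mpr h1) hi)

theorem toNat_sub_lt_right (lo hi m : Int) (h1 : lo ≤ m) (h2 : m < hi) :
    (m - lo).toNat < (hi - lo).toNat :=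
  (Int.toNat_lt_toNat (Int.sub_pos.mpr (lt_of_le_of_lt h1 h2))).mpr (sub_lt_sub_right h2 lo)

-- while lo < hi: mid = (lo + hi) // 2; if mid**3 < s: lo = mid + 1 else: hi = mid
def bSearch (s lo hi : Int) : Int :=
  if lo < hi then
    let mid := PySem.Int.floordiv (lo + hi) 2
    if mid * mid * mid < s then bSearch s (mid + 1) hi else bSearch s lo mid
  else lo
termination_by (hi - lo).toNat
decreasing_by
  · have hb := bSearch_dec lo hi (by assumption)
    exact toNat_sub_lt_left lo hi _ hb.2 hb.1
  · have hb := bSearch_dec lo hi (by assumption)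
    exact toNat_sub_lt_right lo hi _ hb.2 hb.1

def minimumK_alt (nums : List Int) : Int :=
  bLoop nums (bSearch nums.sum 1 (max nums.sum 1))

-- ===== PRECONDITION & SPEC =====
def Spec_minimumK (nums : List Int) (out : Int) : Prop := out = minimumK_alt nums
instance (nums : List Int) (out : Int) : Decidable (Spec_minimumK nums out) := by unfold Spec_minimumK; infer_instance

-- ===== CLAIM (what is proved, stated in full; the proofs are below) =====
def Claim_equal_minimumK : Prop := ∀ (nums : List Int), Dom_minimumK nums → Spec_minimumK nums (minimumK nums)

-- ===== LEMMAS AND PROOFS =====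

-- the two ceiling-division formulas agree for positive divisor
theorem ceil_formulas_eq (num k : Int) (hk : 0 < k) :
    PySem.Int.floordiv (num + k - 1) k = -(PySem.Int.floordiv (-num) k) := by
  have hb := bceil_bracket num k hk
  rw [PySem.Int.floordiv_eq_iff_of_pos hk]
  constructor <;> nlinarith [hb.1, hb.2]

theorem aCeilSum_eq_bCeilSum (nums : List Int) (k : Int) (hk : 0 < k) :
    aCeilSum nums k = bCeilSum nums k := by
  unfold aCeilSum bCeilSum
  apply PySem.List.foldl_congr_mem
  intro acc x _
  rw [ceil_formulas_eq x k hk]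

theorem pred_of_cube (nums : List Int) (k : Int) (hk : 0 < k)
    (hc : nums.sum + (nums.length : Int) * k ≤ k ^ 3) : bCeilSum nums k ≤ k * k := by
  have hb := (bCeilSum_mul_bounds nums k hk).2
  have hn : (0 : Int) ≤ (nums.length : Int) := Int.natCast_nonneg _
  nlinarith

theorem lLoop_spec (s l : Int) :
    l ≤ lLoop s l ∧ s ≤ (lLoop s l) ^ 3 ∧ ∀ j, l ≤ j → j < lLoop s l → ¬ s ≤ j ^ 3 := by
  induction l using lLoop.induct (s := s) with
  | case1 l hguard => rw [lLoop, if_pos hguard]; exact ⟨le_refl l, hguard, fun j h1 h2 => by omega⟩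
  | case2 l hguard ih =>
    rw [lLoop, if_neg hguard]
    refine ⟨by omega, ih.2.1, fun j h1 h2 => ?_⟩
    rcases eq_or_lt_of_le h1 with h | h
    · subst h; exact hguard
    · exact ih.2.2 j (by omega) h2

theorem hLoop_spec (s n h : Int) :
    h ≤ hLoop s n h ∧ s + n * hLoop s n h ≤ (hLoop s n h) ^ 3 := by
  induction h using hLoop.induct (s := s) (n := n) with
  | case1 h hguard => rw [hLoop, if_pos hguard]; exact ⟨le_refl h, hguard⟩
  | case2 h hguard ih => rw [hLoop, if_neg hguard]; exact ⟨by omega, ih.2⟩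

theorem aScan_eq_bLoop (nums : List Int) (k h : Int) (hk : 0 < k) (hkh : k ≤ h)
    (hP : bCeilSum nums h ≤ h * h) : aScan nums k h = bLoop nums k := by
  induction k using aScan.induct (nums := nums) (h := h) with
  | case1 k hguard =>
    rw [aScan, if_pos hguard, bLoop,
      if_pos (by rwa [← aCeilSum_eq_bCeilSum nums k hk])]
  | case2 k hguard hlt ih =>
    rw [aScan, if_neg hguard, if_pos hlt, bLoop,
      if_neg (by rwa [aCeilSum_eq_bCeilSum nums k hk] at hguard)]
    exact ih (by omega) (by omega)
  | case3 k hguard hlt =>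
    have hkh' : k = h := by omega
    subst hkh'
    rw [aCeilSum_eq_bCeilSum nums k hk] at hguard
    exact absurd hP hguard

theorem bSearch_spec (s lo hi : Int) (h1 : 1 ≤ lo) (h2 : lo ≤ hi)
    (hmin : ∀ j, 1 ≤ j → j < lo → ¬ s ≤ j ^ 3) (hhi : s ≤ hi ^ 3) :
    1 ≤ bSearch s lo hi ∧ s ≤ (bSearch s lo hi) ^ 3 ∧
      ∀ j, 1 ≤ j → j < bSearch s lo hi → ¬ s ≤ j ^ 3 := by
  induction lo, hi using bSearch.induct (s := s) with
  | case1 lo hi hlt mid hm ih =>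
    rw [bSearch, if_pos hlt]
    simp only [show PySem.Int.floordiv (lo + hi) 2 = mid from rfl, if_pos hm]
    have hb := bSearch_dec lo hi hlt
    refine ih (by omega) (by omega) (fun j hj1 hjm => ?_) hhi
    intro hcon
    rcases lt_or_ge j lo with hc | hc
    · exact hmin j hj1 hc hcon
    · have hjle : j ≤ mid := by omega
      have : j ^ 3 ≤ mid ^ 3 := by nlinarith [hj1, hjle, sq_nonneg j, sq_nonneg mid, sq_nonneg (j + mid)]
      nlinarith
  | case2 lo hi hlt mid hm ih =>
    rw [bSearch, if_pos hlt]
    simp only [show PySem.Int.floordiv (lo + hi) 2 = mid from rfl, if_neg hm]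
    have hb := bSearch_dec lo hi hlt
    exact ih h1 (by omega) hmin (by nlinarith)
  | case3 lo hi hlt =>
    rw [bSearch, if_neg hlt]
    have : lo = hi := by omega
    exact ⟨h1, by omega ▸ (this ▸ hhi), hmin⟩

-- ===== VERDICT (by name: the statement is the Claim_ definition above) =====
theorem minimumK_spec : Claim_equal_minimumK := by
  intro nums _
  unfold Spec_minimumK minimumK minimumK_alt
  obtain ⟨hl1, hl2, hl3⟩ := lLoop_spec nums.sum 1
  obtain ⟨hh1, hh2⟩ := hLoop_spec nums.sum (nums.length : Int) 1
  set l := lLoop nums.sum 1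
  set h := hLoop nums.sum (nums.length : Int) 1
  have hn : (0 : Int) ≤ (nums.length : Int) := Int.natCast_nonneg _
  have hPh : bCeilSum nums h ≤ h * h := pred_of_cube nums h (by omega) hh2
  have hlh : l ≤ h := by
    by_contra hcon
    push Not at hcon
    exact hl3 h hh1 hcon (by nlinarith)
  rw [aScan_eq_bLoop nums l h (by omega) hlh hPh]
  obtain ⟨hb1, hb2, hb3⟩ := bSearch_spec nums.sum 1 (max nums.sum 1) le_rfl
    (by have := le_max_left nums.sum 1; have := le_max_right nums.sum 1; omega)
    (fun j _ hj => by omega)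
    (by
      have hm1 : (1 : Int) ≤ max nums.sum 1 := le_max_right _ _
      have hm2 : nums.sum ≤ max nums.sum 1 := le_max_left _ _
      have hm3 : (1 : Int) ≤ max nums.sum 1 * max nums.sum 1 := by nlinarith
      nlinarith)
  congr 1
  set r := bSearch nums.sum 1 (max nums.sum 1)
  rcases lt_trichotomy l r with hc | hc | hc
  · exact absurd hl2 (hb3 l (by omega) hc)
  · exact hc
  · exact absurd hb2 (hl3 r hb1 hc)
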